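-- pv_equiv track=rewrite | github.com/alexandru-dinu/advent-of-code | 2024/24/solve.py | adder_nbit
-- ===== SOURCE A (Python) =====
-- def adder_nbit(n1, n2, n):
--     assert 0 <= n1 < 2**n
--     assert 0 <= n2 < 2**n
--
--     c = 0
--     res = 0
--     for k in range(n):
--         x, y = (n1 >> k) & 1, (n2 >> k) & 1
--
--         t1 = x ^ y
--         z = t1 ^ c
--         t2 = x & y
--         t3 = t1 & c
--         c = t2 | t3
--
--         res |= z << k
--
--     res |= c << n
--
--     return res
-- ===== SOURCE B (Python) =====
-- def adder_nbit(n1, n2, n):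
--     assert 0 <= n1 < 2**n
--     assert 0 <= n2 < 2**n
--     return n1 + n2
-- ===== Notes on version B (the rewrite author's own statement) =====
-- stated objective: faster
-- what changed: Replaced the bit-by-bit ripple-carry loop (per-bit xor/and/or with an explicit carry) by the closed form n1 + n2, which the loop provably computes for 0 <= n1, n2 < 2**n.
import Mathlib
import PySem

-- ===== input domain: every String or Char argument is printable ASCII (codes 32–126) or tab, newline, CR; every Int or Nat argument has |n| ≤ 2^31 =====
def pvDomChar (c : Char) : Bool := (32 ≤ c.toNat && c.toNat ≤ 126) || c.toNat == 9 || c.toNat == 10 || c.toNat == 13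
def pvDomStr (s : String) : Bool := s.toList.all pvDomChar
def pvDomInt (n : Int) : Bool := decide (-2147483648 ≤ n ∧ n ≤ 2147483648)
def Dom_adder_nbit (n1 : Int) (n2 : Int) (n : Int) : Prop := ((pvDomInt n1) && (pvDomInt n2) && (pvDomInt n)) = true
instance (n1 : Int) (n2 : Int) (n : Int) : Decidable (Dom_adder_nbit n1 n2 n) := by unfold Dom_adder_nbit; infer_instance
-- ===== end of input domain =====

-- B replaces A's per-bit ripple-carry loop by the closed form n1 + n2 (objective: faster).

-- ===== PORT A =====
-- one iteration of A's `for k in range(n)` body over the state (c, res);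
-- k comes from range(n), so k ≥ 0 inside Pre_ and `k.toNat` is exact there
def adderStep (n1 : Int) (n2 : Int) (st : Int × Int) (k : Int) : Int × Int :=
  let x := PySem.Int.band (n1 >>> k.toNat) 1
  let y := PySem.Int.band (n2 >>> k.toNat) 1
  let t1 := PySem.Int.bxor x y
  let z := PySem.Int.bxor t1 st.1
  let t2 := PySem.Int.band x y
  let t3 := PySem.Int.band t1 st.1
  (PySem.Int.bor t2 t3, PySem.Int.bor st.2 (z <<< k.toNat))

-- the failing asserts and the negative-shift ValueError (n < 0) raise; Pre_ excludes them
def adder_nbit (n1 : Int) (n2 : Int) (n : Int) : Int :=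
  let s := (PySem.List.pyRange 0 n 1).foldl (adderStep n1 n2) (0, 0)
  PySem.Int.bor s.2 (s.1 <<< n.toNat)

-- ===== PORT B =====
def adder_nbit_alt (n1 : Int) (n2 : Int) (n : Int) : Int := n1 + n2

-- ===== PRECONDITION & SPEC =====
-- exactly where A returns: n ≥ 0 (else the final `c << n` raises ValueError) and both
-- asserts 0 ≤ n1 < 2**n, 0 ≤ n2 < 2**n hold (else AssertionError)
def Pre_adder_nbit (n1 : Int) (n2 : Int) (n : Int) : Prop :=
  0 ≤ n ∧ 0 ≤ n1 ∧ n1 < 2 ^ n.toNat ∧ 0 ≤ n2 ∧ n2 < 2 ^ n.toNat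
instance (n1 : Int) (n2 : Int) (n : Int) : Decidable (Pre_adder_nbit n1 n2 n) := by
  unfold Pre_adder_nbit; infer_instance
def pvWitness_adder_nbit : Int × Int × Int := (3, 5, 4)

def Spec_adder_nbit (n1 : Int) (n2 : Int) (n : Int) (out : Int) : Prop := out = adder_nbit_alt n1 n2 n
instance (n1 : Int) (n2 : Int) (n : Int) (out : Int) : Decidable (Spec_adder_nbit n1 n2 n out) := by
  unfold Spec_adder_nbit; infer_instance

-- ===== CLAIM (what is proved, stated in full; the proofs are below) =====
def Claim_equal_adder_nbit : Prop := ∀ (n1 : Int) (n2 : Int) (n : Int), Dom_adder_nbit n1 n2 n → Pre_adder_nbit n1 n2 n → Spec_adder_nbit n1 n2 n (adder_nbit n1 n2 n)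

-- ===== LEMMAS AND PROOFS =====

theorem pv_shiftRight_natCast (a k : Nat) : ((a : Int) >>> k) = ((a >>> k : Nat) : Int) := rfl

-- or-ing a bit shifted above everything in rb is addition
theorem pv_lor_shift (p rb z : Nat) (hr : rb < 2 ^ p) (hz : z < 2) :
    rb ||| (z <<< p) = rb + 2 ^ p * z := by
  rcases (by omega : z = 0 ∨ z = 1) with h | h <;> subst h
  · simp
  · rw [Nat.shiftLeft_eq, one_mul]
    have hd := Nat.div_add_mod (rb ||| 2 ^ p) (2 ^ p)
    have h1 : (rb ||| 2 ^ p) % 2 ^ p = rb := by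
      rw [Nat.or_mod_two_pow, Nat.mod_self, Nat.mod_eq_of_lt hr]; simp
    have h2 : (rb ||| 2 ^ p) / 2 ^ p = 1 := by
      rw [Nat.or_div_two_pow, Nat.div_self (Nat.two_pow_pos p), Nat.div_eq_of_lt hr]; simp
    rw [h1, h2] at hd; omega

-- the three-bit full-adder truth table as arithmetic
theorem pv_bit3 (x y c : Nat) (hx : x < 2) (hy : y < 2) (hc : c < 2) :
    ((x &&& y) ||| ((x ^^^ y) &&& c) = (x + y + c) / 2) ∧
      ((x ^^^ y) ^^^ c = (x + y + c) % 2) := by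
  interval_cases x <;> interval_cases y <;> interval_cases c <;> exact ⟨by decide, by decide⟩

theorem pv_step_arith (p rb t : Nat) (hr : rb < 2 ^ p) :
    (rb + 2 ^ p * t) / 2 ^ (p + 1) = t / 2 ∧
      (rb + 2 ^ p * t) % 2 ^ (p + 1) = rb + 2 ^ p * (t % 2) := by
  have h : rb + 2 ^ p * t = (rb + 2 ^ p * (t % 2)) + 2 ^ (p + 1) * (t / 2) := by
    have hsplit : 2 ^ p * (2 * (t / 2) + t % 2) = 2 ^ p * (t % 2) + 2 ^ (p + 1) * (t / 2) := by
      rw [pow_succ]; ring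
    rw [show 2 * (t / 2) + t % 2 = t from Nat.div_add_mod t 2] at hsplit
    omega
  have hlt : rb + 2 ^ p * (t % 2) < 2 ^ (p + 1) := by
    have : t % 2 < 2 := Nat.mod_lt _ (by omega)
    rw [pow_succ]; nlinarith [Nat.two_pow_pos p]
  constructor
  · rw [h, Nat.add_mul_div_left _ _ (Nat.two_pow_pos (p + 1)), Nat.div_eq_of_lt hlt, Nat.zero_add]
  · rw [h, Nat.add_mul_mod_self_left, Nat.mod_eq_of_lt hlt]

-- the x-bit A extracts at position k is (a / 2^k) % 2
theorem pv_bit_extract (a k : Nat) :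
    PySem.Int.band ((a : Int) >>> k) 1 = ((a / 2 ^ k % 2 : Nat) : Int) := by
  rw [pv_shiftRight_natCast, show (1 : Int) = ((1 : Nat) : Int) from rfl,
    PySem.Int.band_natCast, Nat.and_one_is_mod, Nat.shiftRight_eq_div_pow]

-- loop invariant: after the first m iterations, res and c hold the low-sum's mod and carry
theorem pv_loop_inv (a b m : Nat) :
    (PySem.List.pyRange 0 (m : Int) 1).foldl (adderStep (a : Int) (b : Int)) (0, 0)
      = ((((a % 2 ^ m + b % 2 ^ m) / 2 ^ m : Nat) : Int), (((a % 2 ^ m + b % 2 ^ m) % 2 ^ m : Nat) : Int)) := by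
  induction m with
  | zero => simp
  | succ m ih =>
    have hcast : ((m + 1 : Nat) : Int) = (m : Int) + 1 := by push_cast; ring
    rw [hcast, PySem.List.pyRange_one_succ_right (Int.natCast_nonneg m), List.foldl_append, ih]
    set S := a % 2 ^ m + b % 2 ^ m with hS
    set xb := a / 2 ^ m % 2 with hxb
    set yb := b / 2 ^ m % 2 with hyb
    have hp : 0 < 2 ^ m := Nat.two_pow_pos m
    have hx : xb < 2 := Nat.mod_lt _ (by omega)
    have hy : yb < 2 := Nat.mod_lt _ (by omega)
    have hSlt : S < 2 ^ m + 2 ^ m := by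
      have := Nat.mod_lt a hp; have := Nat.mod_lt b hp; omega
    have hc : S / 2 ^ m < 2 := by
      rw [Nat.div_lt_iff_lt_mul hp]; omega
    have hr : S % 2 ^ m < 2 ^ m := Nat.mod_lt _ hp
    simp only [List.foldl_cons, List.foldl_nil, adderStep, Int.toNat_natCast, pv_bit_extract,
      PySem.Int.bxor_natCast, PySem.Int.band_natCast, PySem.Int.bor_natCast,
      ← Int.natCast_shiftLeft]
    obtain ⟨h1, h2⟩ := pv_bit3 xb yb (S / 2 ^ m) hx hy hc
    rw [h1, h2]
    have hz : (xb + yb + S / 2 ^ m) % 2 < 2 := Nat.mod_lt _ (by omega)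
    rw [pv_lor_shift m (S % 2 ^ m) _ hr hz]
    obtain ⟨hd, hm⟩ := pv_step_arith m (S % 2 ^ m) (xb + yb + S / 2 ^ m) hr
    have hS' : a % 2 ^ (m + 1) + b % 2 ^ (m + 1) = S % 2 ^ m + 2 ^ m * (xb + yb + S / 2 ^ m) := by
      rw [Nat.mod_pow_succ, Nat.mod_pow_succ, ← hxb, ← hyb]
      have hd2 := Nat.div_add_mod S (2 ^ m)
      have hdist : 2 ^ m * (xb + yb + S / 2 ^ m) = 2 ^ m * xb + 2 ^ m * yb + 2 ^ m * (S / 2 ^ m) := by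
        ring
      omega
    rw [Prod.mk.injEq]
    constructor
    · rw [hS', hd]
    · rw [hS', hm]

-- ===== VERDICT (by name: the statement is the Claim_ definition above) =====
theorem adder_nbit_spec : Claim_equal_adder_nbit := by
  intro n1 n2 n _ hPre
  obtain ⟨hn, h1, h1u, h2, h2u⟩ := hPre
  unfold Spec_adder_nbit adder_nbit adder_nbit_alt
  set m := n.toNat with hm
  have hneq : n = (m : Int) := (Int.toNat_of_nonneg hn).symm
  set a := n1.toNat with ha
  set b := n2.toNat with hb
  have h1eq : n1 = (a : Int) := (Int.toNat_of_nonneg h1).symm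
  have h2eq : n2 = (b : Int) := (Int.toNat_of_nonneg h2).symm
  have hau : a < 2 ^ m := by
    have : ((a : Int)) < ((2 ^ m : Nat) : Int) := by push_cast; rw [← h1eq]; exact h1u
    exact_mod_cast this
  have hbu : b < 2 ^ m := by
    have : ((b : Int)) < ((2 ^ m : Nat) : Int) := by push_cast; rw [← h2eq]; exact h2u
    exact_mod_cast this
  rw [hneq, h1eq, h2eq, pv_loop_inv a b m]
  have hma : a % 2 ^ m = a := Nat.mod_eq_of_lt hau
  have hmb : b % 2 ^ m = b := Nat.mod_eq_of_lt hbu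
  rw [hma, hmb]
  have hcarry : (a + b) / 2 ^ m < 2 := by
    rw [Nat.div_lt_iff_lt_mul (Nat.two_pow_pos m)]; omega
  simp only [← Int.natCast_shiftLeft, PySem.Int.bor_natCast]
  rw [pv_lor_shift m ((a + b) % 2 ^ m) ((a + b) / 2 ^ m) (Nat.mod_lt _ (Nat.two_pow_pos m)) hcarry]
  have hfin : (a + b) % 2 ^ m + 2 ^ m * ((a + b) / 2 ^ m) = a + b := by
    have := Nat.div_add_mod (a + b) (2 ^ m); omega
  rw [hfin]
  push_cast
  ring
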